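-- pv_equiv track=rewrite | github.com/Saatvik538/AI-1-2-Labs-at-TJHSST | othello/othello6.py | is_safe_edge
-- ===== SOURCE A (Python) =====
-- EDGES = {1, 2, 3, 4, 5, 6, 8, 16, 24, 32, 40, 48, 15, 23, 31, 39, 47, 55, 57, 58, 59, 60, 61, 62}
--
-- def is_safe_edge(board, move, token):
--     if move not in EDGES:
--         return False
--
--     row, col = divmod(move, 8)
--     directions = [(-1, 0), (1, 0), (0, -1), (0, 1)]
--
--     for dx, dy in directions:
--         x, y = row + dx, col + dy
--         if 0 <= x < 8 and 0 <= y < 8: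
--             if board[x*8 + y] == '.':
--                 return False
--
--     for dx, dy in directions:
--         x, y = row + dx, col + dy
--         while 0 <= x < 8 and 0 <= y < 8:
--             if board[x*8 + y] != token:
--                 break
--             x, y = x + dx, y + dy
--         if 0 <= x < 8 and 0 <= y < 8 and board[x*8 + y] == '.':
--             return False
--
--     return True
-- ===== SOURCE B (Python) =====
-- EDGES = {1, 2, 3, 4, 5, 6, 8, 16, 24, 32, 40, 48, 15, 23, 31, 39, 47, 55, 57, 58, 59, 60, 61, 62}
--
-- def is_safe_edge(board, move, token):
--     if move not in EDGES:
--         return False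
--     row = move // 8
--     # the four orthogonal rays, as ranges of flat board indices (up, down, left, right)
--     rays = (range(move - 8, -1, -8),
--             range(move + 8, 64, 8),
--             range(move - 1, 8 * row - 1, -1),
--             range(move + 1, 8 * row + 8))
--     for ray in rays:
--         cells = [board[i] for i in ray]
--         # unsafe if the adjacent cell is empty, or the first cell past the run of
--         # our own tokens is empty
--         if cells and (cells[0] == '.' or next((c for c in cells if c != token), None) == '.'):
--             return False
--     return True
-- ===== Notes on version B (the rewrite author's own statement) =====
-- stated objective: simpler
-- what changed: A makes two passes with a hand-stepped (x,y) while-walk per direction; B makes one pass over four precomputed index ranges (the orthogonal rays), materialises each ray's cells and decides failure from the adjacent cell and the first non-token cell of the ray.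
import Mathlib
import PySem

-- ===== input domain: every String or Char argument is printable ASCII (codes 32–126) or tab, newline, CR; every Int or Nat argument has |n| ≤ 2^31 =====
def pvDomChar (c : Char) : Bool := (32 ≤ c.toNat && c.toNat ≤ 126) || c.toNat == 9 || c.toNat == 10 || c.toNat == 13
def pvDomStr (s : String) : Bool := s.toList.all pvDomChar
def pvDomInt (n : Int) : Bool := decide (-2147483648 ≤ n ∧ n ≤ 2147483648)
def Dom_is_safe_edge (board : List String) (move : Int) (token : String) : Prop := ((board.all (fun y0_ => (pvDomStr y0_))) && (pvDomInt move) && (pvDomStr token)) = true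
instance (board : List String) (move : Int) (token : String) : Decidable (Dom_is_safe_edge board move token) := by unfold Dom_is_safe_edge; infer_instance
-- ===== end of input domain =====

-- B replaces A's two passes (a neighbour pre-check loop plus a per-direction while-walk)
-- by a single pass over four precomputed index ranges (the orthogonal rays), deciding each
-- direction from the ray's cell list; objective: simpler. Equivalence is about return values;
-- on boards shorter than 64 cells both Pythons can raise IndexError (excluded by Pre_).

-- ===== PORT A =====
def pvEdges : List Int := [1, 2, 3, 4, 5, 6, 8, 16, 24, 32, 40, 48, 15, 23, 31, 39, 47, 55, 57, 58, 59, 60, 61, 62]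

-- board[i]: total form of list indexing; exact wherever Python does not raise (Pre_ gives 64 ≤ len board, and every index probed on an edge move lies in 0..63)
def pvCellA (board : List String) (i : Int) : String := (PySem.List.pyGet? board i).getD ""

-- first for-loop: returns true iff the loop would `return False`
def pvLoop1 (board : List String) (row col : Int) : List (Int × Int) → Bool
  | [] => false
  | (dx, dy) :: ds =>
    let x := row + dx
    let y := col + dy
    if 0 ≤ x ∧ x < 8 ∧ 0 ≤ y ∧ y < 8 then
      if pvCellA board (x * 8 + y) == "." then true else pvLoop1 board row col ds
    else pvLoop1 board row col ds

-- the while-walk; fuel 8 is exact: from an in-bounds start a unit orthogonal step leaves the 8×8 bounds after at most 8 iterations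
def pvWalkA (board : List String) (token : String) (dx dy : Int) : Nat → Int → Int → Int × Int
  | 0, x, y => (x, y)
  | fuel + 1, x, y =>
    if 0 ≤ x ∧ x < 8 ∧ 0 ≤ y ∧ y < 8 then
      if pvCellA board (x * 8 + y) != token then (x, y)
      else pvWalkA board token dx dy fuel (x + dx) (y + dy)
    else (x, y)

-- second for-loop: returns true iff the loop would `return False`
def pvLoop2 (board : List String) (token : String) (row col : Int) : List (Int × Int) → Bool
  | [] => false
  | (dx, dy) :: ds =>
    let p := pvWalkA board token dx dy 8 (row + dx) (col + dy)
    if (0 ≤ p.1 ∧ p.1 < 8 ∧ 0 ≤ p.2 ∧ p.2 < 8) ∧ pvCellA board (p.1 * 8 + p.2) == "." then true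
    else pvLoop2 board token row col ds

def is_safe_edge (board : List String) (move : Int) (token : String) : Bool :=
  if ¬ pvEdges.contains move then false
  else
    let row := PySem.Int.floordiv move 8
    let col := PySem.Int.mod move 8
    let dirs : List (Int × Int) := [(-1, 0), (1, 0), (0, -1), (0, 1)]
    if pvLoop1 board row col dirs then false
    else if pvLoop2 board token row col dirs then false
    else true

-- ===== PORT B =====
def pvEdgesB : List Int := [1, 2, 3, 4, 5, 6, 8, 16, 24, 32, 40, 48, 15, 23, 31, 39, 47, 55, 57, 58, 59, 60, 61, 62]

def pvCellB (board : List String) (i : Int) : String := (PySem.List.pyGet? board i).getD ""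

-- `cells and (cells[0] == '.' or next((c for c in cells if c != token), None) == '.')`
def pvRayFail (cells : List String) (token : String) : Bool :=
  match cells with
  | [] => false
  | c0 :: _ => c0 == "." || (cells.find? (fun c => c != token) == some ".")

-- the for-loop over the four rays; returns the function's result
def pvLoopB (board : List String) (token : String) : List (List Int) → Bool
  | [] => true
  | r :: rs =>
    if pvRayFail (r.map (pvCellB board)) token then false
    else pvLoopB board token rs

def is_safe_edge_alt (board : List String) (move : Int) (token : String) : Bool :=
  if ¬ pvEdgesB.contains move then false
  else
    let row := PySem.Int.floordiv move 8
    let rays : List (List Int) :=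
      [PySem.List.pyRange (move - 8) (-1) (-8),
       PySem.List.pyRange (move + 8) 64 8,
       PySem.List.pyRange (move - 1) (8 * row - 1) (-1),
       PySem.List.pyRange (move + 1) (8 * row + 8) 1]
    pvLoopB board token rays

-- ===== PRECONDITION & SPEC =====
-- Pre_ excludes edge moves on boards shorter than 64 cells: there both Pythons index past the
-- board's end — A raises IndexError unless it meets a '.' neighbour before an out-of-range
-- index (then it returns False), and B raises IndexError.
def Pre_is_safe_edge (board : List String) (move : Int) (token : String) : Prop :=
  move ∈ ([1, 2, 3, 4, 5, 6, 8, 16, 24, 32, 40, 48, 15, 23, 31, 39, 47, 55, 57, 58, 59, 60, 61, 62] : List Int) → 64 ≤ board.length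
instance (board : List String) (move : Int) (token : String) : Decidable (Pre_is_safe_edge board move token) := by unfold Pre_is_safe_edge; infer_instance

def pvWitness_is_safe_edge : List String × Int × String := (List.replicate 64 "x", 8, "x")

def Spec_is_safe_edge (board : List String) (move : Int) (token : String) (out : Bool) : Prop := out = is_safe_edge_alt board move token
instance (board : List String) (move : Int) (token : String) (out : Bool) : Decidable (Spec_is_safe_edge board move token out) := by unfold Spec_is_safe_edge; infer_instance

-- ===== CLAIM (what is proved, stated in full; the proofs are below) =====
def Claim_equal_is_safe_edge : Prop := ∀ (board : List String) (move : Int) (token : String), Dom_is_safe_edge board move token → Pre_is_safe_edge board move token → Spec_is_safe_edge board move token (is_safe_edge board move token)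

-- ===== LEMMAS AND PROOFS =====

-- the run of own tokens along a ray ends at an empty cell
def pvChain (token : String) : List String → Bool
  | [] => false
  | c :: cs => if c != token then c == "." else pvChain token cs

-- the positions the while-walk visits (in bounds, up to the fuel)
def pvRay (dx dy : Int) : Nat → Int → Int → List (Int × Int)
  | 0, _, _ => []
  | f + 1, x, y =>
    if 0 ≤ x ∧ x < 8 ∧ 0 ≤ y ∧ y < 8 then (x, y) :: pvRay dx dy f (x + dx) (y + dy) else []

-- A's per-direction failure test, abstracted from pvLoop2's body
def pvDirFail (board : List String) (token : String) (dx dy : Int) (f : Nat) (x y : Int) : Bool :=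
  let p := pvWalkA board token dx dy f x y
  decide (0 ≤ p.1 ∧ p.1 < 8 ∧ 0 ≤ p.2 ∧ p.2 < 8) && (pvCellA board (p.1 * 8 + p.2) == ".")

-- A's per-direction neighbour test, abstracted from pvLoop1's body
def pvNb (board : List String) (x y : Int) : Bool :=
  decide (0 ≤ x ∧ x < 8 ∧ 0 ≤ y ∧ y < 8) && (pvCellA board (x * 8 + y) == ".")

lemma pvLoop1_nil (board : List String) (row col : Int) : pvLoop1 board row col [] = false := rfl

lemma pvLoop1_cons (board : List String) (row col dx dy : Int) (ds : List (Int × Int)) :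
    pvLoop1 board row col ((dx, dy) :: ds) = (pvNb board (row + dx) (col + dy) || pvLoop1 board row col ds) := by
  simp only [pvLoop1, pvNb]
  by_cases h : 0 ≤ row + dx ∧ row + dx < 8 ∧ 0 ≤ col + dy ∧ col + dy < 8
  · by_cases hc : pvCellA board ((row + dx) * 8 + (col + dy)) == "." <;> simp [h, hc]
  · simp [h]

lemma pvLoop2_nil (board : List String) (token : String) (row col : Int) : pvLoop2 board token row col [] = false := rfl

lemma pvLoop2_cons (board : List String) (token : String) (row col dx dy : Int) (ds : List (Int × Int)) :
    pvLoop2 board token row col ((dx, dy) :: ds) =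
      (pvDirFail board token dx dy 8 (row + dx) (col + dy) || pvLoop2 board token row col ds) := by
  simp only [pvLoop2, pvDirFail]
  set p := pvWalkA board token dx dy 8 (row + dx) (col + dy) with hp
  by_cases hb : 0 ≤ p.1 ∧ p.1 < 8 ∧ 0 ≤ p.2 ∧ p.2 < 8 <;>
    by_cases hc : pvCellA board (p.1 * 8 + p.2) == "." <;> simp [hb, hc]

lemma pvLoopB_nil (board : List String) (token : String) : pvLoopB board token [] = true := rfl

lemma pvLoopB_cons (board : List String) (token : String) (r : List Int) (rs : List (List Int)) :
    pvLoopB board token (r :: rs) = (!pvRayFail (r.map (pvCellB board)) token && pvLoopB board token rs) := by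
  simp only [pvLoopB]
  by_cases h : pvRayFail (r.map (pvCellB board)) token <;> simp [h]

lemma pvCellB_eq (board : List String) (i : Int) : pvCellB board i = pvCellA board i := rfl

lemma pvFind_eq_chain (token : String) (cells : List String) :
    (cells.find? (fun c => c != token) == some ".") = pvChain token cells := by
  induction cells with
  | nil => rfl
  | cons c cs ih =>
    by_cases h : c != token
    · simp [List.find?, h, pvChain]
    · simp only [List.find?, h, pvChain]
      simpa [h] using ih

lemma pvRayFail_nil (token : String) : pvRayFail [] token = false := rfl

lemma pvRayFail_cons (token : String) (c0 : String) (cs : List String) :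
    pvRayFail (c0 :: cs) token = ((c0 == ".") || pvChain token (c0 :: cs)) := by
  simp only [pvRayFail]
  rw [pvFind_eq_chain]

lemma pvChain_nil (token : String) : pvChain token [] = false := rfl

-- the walk's failure test equals the chain test on the visited cells, given enough fuel to leave the bounds
lemma pvDirFail_eq_chain (board : List String) (token : String) (dx dy : Int) :
    ∀ (f : Nat) (x y : Int),
      ¬ (0 ≤ x + f * dx ∧ x + f * dx < 8 ∧ 0 ≤ y + f * dy ∧ y + f * dy < 8) →
      pvDirFail board token dx dy f x y =
        pvChain token ((pvRay dx dy f x y).map (fun p => pvCellA board (p.1 * 8 + p.2))) := by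
  intro f
  induction f with
  | zero =>
    intro x y h
    simp only [Nat.cast_zero, zero_mul, add_zero] at h
    simp [pvDirFail, pvWalkA, pvRay, pvChain, h]
  | succ f ih =>
    intro x y h
    by_cases hin : 0 ≤ x ∧ x < 8 ∧ 0 ≤ y ∧ y < 8
    · by_cases hc : pvCellA board (x * 8 + y) != token
      · simp [pvDirFail, pvWalkA, pvRay, pvChain, hin, hc]
      · have step : pvDirFail board token dx dy (f + 1) x y = pvDirFail board token dx dy f (x + dx) (y + dy) := by
          simp [pvDirFail, pvWalkA, hin, hc]
        have e1 : x + ((f : Int) + 1) * dx = x + dx + (f : Int) * dx := by ring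
        have e2 : y + ((f : Int) + 1) * dy = y + dy + (f : Int) * dy := by ring
        push_cast at h
        rw [e1, e2] at h
        rw [step, ih (x + dx) (y + dy) h]
        simp [pvRay, pvChain, hin, hc]
    · simp [pvDirFail, pvWalkA, pvRay, pvChain, hin]

-- ===== VERDICT (by name: the statement is the Claim_ definition above) =====
set_option maxHeartbeats 2000000 in
theorem is_safe_edge_spec : Claim_equal_is_safe_edge := by
  intro board move token hdom hpre
  unfold Spec_is_safe_edge
  by_cases hm : move ∈ pvEdges
  · simp only [pvEdges, List.mem_cons, List.not_mem_nil, or_false] at hm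
    rcases hm with rfl | rfl | rfl | rfl | rfl | rfl | rfl | rfl | rfl | rfl | rfl | rfl | rfl | rfl | rfl | rfl | rfl | rfl | rfl | rfl | rfl | rfl | rfl | rfl <;>
    · simp only [is_safe_edge, is_safe_edge_alt]
      norm_num [pvEdges, pvEdgesB, PySem.Int.floordiv, PySem.Int.mod, Int.fdiv, Int.fmod,
        pvLoop1_cons, pvLoop1_nil, pvLoop2_cons, pvLoop2_nil, pvLoopB_cons, pvLoopB_nil,
        pvDirFail_eq_chain, pvRay, pvNb, pvRayFail_cons, pvRayFail_nil, pvCellB_eq,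
        PySem.List.pyRange, Bool.not_or, Bool.beq_eq_decide_eq, List.range_succ,
        List.map_append, List.map_cons, List.map_nil, Function.comp]
      try norm_num [Int.toNat, List.range_succ, List.map_append, List.map_cons, List.map_nil,
        Function.comp, pvRayFail_cons, pvRayFail_nil, pvCellB_eq, Bool.beq_eq_decide_eq, Bool.not_or]
      try simp only [pvChain_nil, Bool.not_false, Bool.true_and, Bool.and_true]
      try ac_rfl
  · have h2 : move ∉ pvEdgesB := by simpa [pvEdgesB, pvEdges] using hm
    simp [is_safe_edge, is_safe_edge_alt, hm, h2]
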